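-- pv_equiv track=rewrite | github.com/Tsangares/voteIOTA | util.py | totalVotes
-- ===== SOURCE A (Python) =====
-- def totalVotes(states):
--     total = {}
--     for state,votes in states.items():
--         for candidate,count in votes.items():
--             if candidate not in total:
--                 total[candidate] = 0
--             total[candidate] += count
--     return total
-- ===== SOURCE B (Python) =====
-- def totalVotes(states):
--     groups = {}
--     for votes in states.values():
--         for candidate, count in votes.items():
--             groups.setdefault(candidate, []).append(count)
--     return {c: sum(counts) for c, counts in groups.items()}
-- ===== Notes on version B (the rewrite author's own statement) =====
-- stated objective: alternative
-- what changed: A keeps one running-total dict updated in place per (candidate, count) pair; B instead groups the data first - it collects each candidate's counts into a per-candidate list - and then sums each group in a second pass.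
import Mathlib
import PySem

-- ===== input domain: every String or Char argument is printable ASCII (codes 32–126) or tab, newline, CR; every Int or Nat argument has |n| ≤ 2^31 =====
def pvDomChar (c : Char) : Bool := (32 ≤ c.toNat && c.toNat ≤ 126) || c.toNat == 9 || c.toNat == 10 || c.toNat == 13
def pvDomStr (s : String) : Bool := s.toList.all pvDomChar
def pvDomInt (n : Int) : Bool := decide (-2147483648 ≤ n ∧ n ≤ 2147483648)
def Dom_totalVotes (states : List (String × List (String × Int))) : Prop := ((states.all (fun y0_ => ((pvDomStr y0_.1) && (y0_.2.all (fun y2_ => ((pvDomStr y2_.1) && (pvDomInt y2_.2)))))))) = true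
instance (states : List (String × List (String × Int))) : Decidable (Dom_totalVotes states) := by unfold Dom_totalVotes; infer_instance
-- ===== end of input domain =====

-- B replaces A's single running-total accumulation by a group-then-sum decomposition: it first
-- gathers every candidate's counts into per-candidate lists, then sums each group; objective: alternative.

-- ===== PORT A =====
-- the body of A's inner loop: 'if candidate not in total: total[candidate] = 0' then 'total[candidate] += count'
def pvStepA (total : PySem.Dict String Int) (cn : String × Int) : PySem.Dict String Int :=
  let t := if total.contains cn.1 then total else total.insert cn.1 0
  t.insert cn.1 (t.getD cn.1 0 + cn.2)

def totalVotes (states : List (String × List (String × Int))) : List (String × Int) :=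
  (states.foldl (fun total sv => sv.2.foldl pvStepA total) PySem.Dict.empty).items

-- ===== PORT B =====
-- 'groups.setdefault(candidate, []).append(count)' = modify with default []
def totalVotes_alt (states : List (String × List (String × Int))) : List (String × Int) :=
  (states.foldl
      (fun g sv => sv.2.foldl (fun g cn => g.modify cn.1 [] (fun counts => counts ++ [cn.2])) g)
      PySem.Dict.empty).items.map (fun p => (p.1, p.2.sum))

-- ===== PRECONDITION & SPEC =====
def Spec_totalVotes (states : List (String × List (String × Int))) (out : List (String × Int)) : Prop := out = totalVotes_alt states
instance (states : List (String × List (String × Int))) (out : List (String × Int)) : Decidable (Spec_totalVotes states out) := by unfold Spec_totalVotes; infer_instance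

-- ===== CLAIM (what is proved, stated in full; the proofs are below) =====
def Claim_equal_totalVotes : Prop := ∀ (states : List (String × List (String × Int))), Dom_totalVotes states → Spec_totalVotes states (totalVotes states)

-- ===== LEMMAS AND PROOFS =====

-- the total number of votes for candidate c among the pairs of l
def pvSumFor (l : List (String × Int)) (c : String) : Int :=
  ((l.filter (fun p => p.1 == c)).map Prod.snd).sum

theorem getD_stepA (d : PySem.Dict String Int) (cn : String × Int) (k : String) :
    (pvStepA d cn).getD k 0 = if k = cn.1 then d.getD cn.1 0 + cn.2 else d.getD k 0 := by
  unfold pvStepA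
  by_cases hc : d.contains cn.1
  · simp [hc, PySem.Dict.getD_insert]
  · simp only [hc, if_false, Bool.false_eq_true, PySem.Dict.getD_insert]
    rw [PySem.Dict.getD_of_not_contains d 0 (by simpa using hc)]
    split_ifs <;> simp

theorem keys_stepA (d : PySem.Dict String Int) (cn : String × Int) :
    (pvStepA d cn).keys = PySem.Set.add d.keys cn.1 := by
  unfold pvStepA PySem.Set.add
  by_cases hc : d.contains cn.1
  · rw [if_pos hc]
    rw [PySem.Dict.keys_insert_of_contains _ _ hc]
    rw [if_pos (by simpa [List.contains_iff_mem, ← PySem.Dict.contains_iff_mem_keys] using hc)]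
  · rw [if_neg hc]
    rw [PySem.Dict.keys_insert_of_contains _ _ (PySem.Dict.contains_insert_self _ _ _)]
    rw [PySem.Dict.keys_insert_of_not_contains _ _ (by simpa using hc)]
    rw [if_neg (by simpa [List.contains_iff_mem, ← PySem.Dict.contains_iff_mem_keys] using hc)]

theorem nodup_keys_stepA (d : PySem.Dict String Int) (cn : String × Int)
    (h : d.keys.Nodup) : (pvStepA d cn).keys.Nodup := by
  unfold pvStepA
  split <;> exact PySem.Dict.nodup_keys_insert _ _ _
    (by first | exact h | exact PySem.Dict.nodup_keys_insert _ _ _ h)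

theorem pvSumFor_cons (x : String × Int) (t : List (String × Int)) (c : String) :
    pvSumFor (x :: t) c = (if c = x.1 then x.2 else 0) + pvSumFor t c := by
  unfold pvSumFor
  rw [List.filter_cons]
  by_cases hx : c = x.1
  · rw [if_pos (by simp [hx]), if_pos hx]; simp
  · rw [if_neg (by simp; exact fun h => hx h.symm), if_neg hx]; simp

theorem getD_foldA (l : List (String × Int)) (d : PySem.Dict String Int) (k : String) :
    (l.foldl pvStepA d).getD k 0 = d.getD k 0 + pvSumFor l k := by
  induction l generalizing d with
  | nil => simp [pvSumFor]
  | cons x t ih =>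
    rw [List.foldl_cons, ih, getD_stepA, pvSumFor_cons]
    by_cases hk : k = x.1
    · rw [if_pos hk, if_pos hk, hk]; ring
    · rw [if_neg hk, if_neg hk]; ring

theorem keys_foldA (l : List (String × Int)) (d : PySem.Dict String Int) :
    (l.foldl pvStepA d).keys = PySem.Set.update d.keys (l.map Prod.fst) := by
  induction l generalizing d with
  | nil => simp [PySem.Set.update]
  | cons x t ih => simp [ih, keys_stepA, PySem.Set.update]

theorem nodup_keys_foldA (l : List (String × Int)) (d : PySem.Dict String Int)
    (h : d.keys.Nodup) : (l.foldl pvStepA d).keys.Nodup := by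
  induction l generalizing d with
  | nil => exact h
  | cons x t ih => exact ih _ (nodup_keys_stepA _ _ h)

-- ===== VERDICT (by name: the statement is the Claim_ definition above) =====
theorem totalVotes_spec : Claim_equal_totalVotes := by
  intro states _
  unfold Spec_totalVotes totalVotes totalVotes_alt
  rw [← List.foldl_flatMap, ← List.foldl_flatMap]
  rw [PySem.Dict.items_eq_map_keys _
    (nodup_keys_foldA _ _ (by rw [PySem.Dict.keys_empty]; exact List.nodup_nil)) 0]
  rw [keys_foldA, PySem.Dict.keys_empty]
  rw [PySem.Dict.items_eq_map_keys _
    (PySem.Dict.nodup_keys_foldl_modify_key _ Prod.fst [] (fun _ cn counts => counts ++ [cn.2]) _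
      (by rw [PySem.Dict.keys_empty]; exact List.nodup_nil)) []]
  rw [PySem.Dict.keys_foldl_modify_key _ Prod.fst [] (fun _ cn counts => counts ++ [cn.2]),
    PySem.Dict.keys_empty]
  rw [List.map_map]
  apply List.map_congr_left
  intro c _
  refine Prod.ext rfl ?_
  show (List.foldl pvStepA PySem.Dict.empty (states.flatMap Prod.snd)).getD c 0 = _
  rw [getD_foldA, PySem.Dict.getD_empty, zero_add]
  show pvSumFor _ c =
    (((states.flatMap Prod.snd).foldl
      (fun (g : PySem.Dict String (List Int)) (cn : String × Int) => g.modify cn.1 [] (fun counts => counts ++ [cn.2]))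
      PySem.Dict.empty).getD c []).sum
  rw [PySem.Dict.getD_foldl_modify_append, PySem.Dict.getD_empty, List.nil_append]
  rfl
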